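-- pv_equiv track=rewrite | github.com/SOBC67/Fast | OTPv1.py | interface_get_key_table
-- ===== SOURCE A (Python) =====
-- def interface_get_key_table(keyx):
--     return_variable = []
--     c = 0
--     textx = ''
--     for i in keyx:
--         c += 1
--         textx += str(i)
--         if c%4 == 0:
--             return_variable.append(textx)
--             textx =''
--     return return_variable
-- ===== SOURCE B (Python) =====
-- def interface_get_key_table(keyx):
--     return [''.join(str(x) for x in g) for g in zip(*[iter(keyx)] * 4)]
-- ===== Notes on version B (the rewrite author's own statement) =====
-- stated objective: idiomatic
-- what changed: Replaces the counter/modulo accumulator loop with the shared-iterator zip grouping idiom: zip over one iterator yields 4-tuples directly (dropping the incomplete tail), each joined into a string; no counter, no mutable string buffer.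
import Mathlib
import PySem

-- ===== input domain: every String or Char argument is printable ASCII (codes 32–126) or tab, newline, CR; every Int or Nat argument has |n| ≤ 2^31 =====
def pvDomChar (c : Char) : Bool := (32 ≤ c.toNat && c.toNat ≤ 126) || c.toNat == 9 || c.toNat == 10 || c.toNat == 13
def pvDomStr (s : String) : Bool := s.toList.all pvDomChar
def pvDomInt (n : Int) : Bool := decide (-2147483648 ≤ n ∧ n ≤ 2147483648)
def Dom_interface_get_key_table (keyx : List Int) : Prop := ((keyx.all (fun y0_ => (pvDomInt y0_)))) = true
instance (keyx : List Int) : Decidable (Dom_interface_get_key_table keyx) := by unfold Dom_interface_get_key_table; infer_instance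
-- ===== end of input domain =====

-- B replaces A's counter/modulo string-accumulator loop with the zip-of-one-iterator grouping idiom (four-at-a-time chunks, remainder dropped); objective: idiomatic, same cost.


-- ===== PORT A =====
-- A: counter + string accumulator, emit every 4th element (ported as a foldl over the same state)
def interface_get_key_table (keyx : List Int) : List String :=
  (keyx.foldl
    (fun (st : List String × Int × String) i =>
      let c := st.2.1 + 1
      let textx := st.2.2 ++ PySem.Int.toStr i
      if PySem.Int.mod c 4 = 0 then (st.1 ++ [textx], c, "") else (st.1, c, textx))
    ([], 0, "")).1

-- ===== PORT B =====
-- B: zip(*[iter(keyx)]*4) pulls four elements at a time; ported as the four-at-a-time recursion it performs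
def interface_get_key_table_alt (keyx : List Int) : List String :=
  match keyx with
  | a :: b :: c :: d :: rest =>
      String.join [PySem.Int.toStr a, PySem.Int.toStr b, PySem.Int.toStr c, PySem.Int.toStr d]
        :: interface_get_key_table_alt rest
  | _ => []

-- ===== PRECONDITION & SPEC =====
def Spec_interface_get_key_table (keyx : List Int) (out : List String) : Prop := out = interface_get_key_table_alt keyx
instance (keyx : List Int) (out : List String) : Decidable (Spec_interface_get_key_table keyx out) := by unfold Spec_interface_get_key_table; infer_instance

-- ===== CLAIM (what is proved, stated in full; the proofs are below) =====
def Claim_equal_interface_get_key_table : Prop := ∀ (keyx : List Int), Dom_interface_get_key_table keyx → Spec_interface_get_key_table keyx (interface_get_key_table keyx)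

-- ===== LEMMAS AND PROOFS =====

def pvStepA (st : List String × Int × String) (i : Int) : List String × Int × String :=
  let c := st.2.1 + 1
  let textx := st.2.2 ++ PySem.Int.toStr i
  if PySem.Int.mod c 4 = 0 then (st.1 ++ [textx], c, "") else (st.1, c, textx)

lemma pvPortA_eq (keyx : List Int) :
    interface_get_key_table keyx = (keyx.foldl pvStepA ([], 0, "")).1 := rfl

lemma pvMod4 (a : Int) : PySem.Int.mod a 4 = a % 4 :=
  PySem.Int.mod_eq_emod_of_pos (by norm_num)

lemma pvLoop_eq (keyx : List Int) : ∀ (rv : List String) (c : Int), c % 4 = 0 →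
    (keyx.foldl pvStepA (rv, c, "")).1 = rv ++ interface_get_key_table_alt keyx := by
  induction keyx using interface_get_key_table_alt.induct with
  | case1 a b cc d rest ih =>
      intro rv c hc
      have h1 : ¬ PySem.Int.mod (c + 1) 4 = 0 := by rw [pvMod4]; omega
      have h2 : ¬ PySem.Int.mod (c + 1 + 1) 4 = 0 := by rw [pvMod4]; omega
      have h3 : ¬ PySem.Int.mod (c + 1 + 1 + 1) 4 = 0 := by rw [pvMod4]; omega
      have h4 : PySem.Int.mod (c + 1 + 1 + 1 + 1) 4 = 0 := by rw [pvMod4]; omega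
      have h4' : (c + 1 + 1 + 1 + 1) % 4 = 0 := by omega
      simp only [List.foldl_cons, pvStepA]
      rw [if_neg h1]; try dsimp only
      rw [if_neg h2]; try dsimp only
      rw [if_neg h3]; try dsimp only
      rw [if_pos h4]; try dsimp only
      rw [ih _ _ h4']
      simp [interface_get_key_table_alt, String.join, List.foldl]
  | case2 l h =>
      intro rv c hc
      match l, h with
      | [], _ => simp [interface_get_key_table_alt]
      | [a], _ =>
          have h1 : ¬ PySem.Int.mod (c + 1) 4 = 0 := by rw [pvMod4]; omega
          simp only [List.foldl_cons, pvStepA, List.foldl_nil]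
          rw [if_neg h1]
          simp [interface_get_key_table_alt]
      | [a,b], _ =>
          have h1 : ¬ PySem.Int.mod (c + 1) 4 = 0 := by rw [pvMod4]; omega
          have h2 : ¬ PySem.Int.mod (c + 1 + 1) 4 = 0 := by rw [pvMod4]; omega
          simp only [List.foldl_cons, pvStepA, List.foldl_nil]
          rw [if_neg h1]; try dsimp only
          rw [if_neg h2]
          simp [interface_get_key_table_alt]
      | [a,b,cc], _ =>
          have h1 : ¬ PySem.Int.mod (c + 1) 4 = 0 := by rw [pvMod4]; omega
          have h2 : ¬ PySem.Int.mod (c + 1 + 1) 4 = 0 := by rw [pvMod4]; omega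
          have h3 : ¬ PySem.Int.mod (c + 1 + 1 + 1) 4 = 0 := by rw [pvMod4]; omega
          simp only [List.foldl_cons, pvStepA, List.foldl_nil]
          rw [if_neg h1]; try dsimp only
          rw [if_neg h2]; try dsimp only
          rw [if_neg h3]
          simp [interface_get_key_table_alt]
      | a::b::cc::d::rest, h => exact absurd rfl (h a b cc d rest)

-- ===== VERDICT (by name: the statement is the Claim_ definition above) =====
theorem interface_get_key_table_spec : Claim_equal_interface_get_key_table := by
  intro keyx _
  unfold Spec_interface_get_key_table
  rw [pvPortA_eq]
  simpa using pvLoop_eq keyx [] 0 (by decide)
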